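-- pv_equiv track=rewrite | github.com/miguelbper/jane-street-puzzles | 2025/2025-05-number-cross-5.py | compute_square_lists
-- ===== SOURCE A (Python) =====
-- N = 11
--
-- def compute_square_lists(n: int) -> list[list[int]]:
--     """Generate lists of square numbers with n or fewer digits, excluding
--     numbers containing zero."""
--     lists = [[] for _ in range(N + 1)]
--     odd = 1
--     num = 1
--     while num < 10**n:
--         if "0" not in str(num):
--             lists[len(str(num))].append(num)
--         odd += 2
--         num += odd
--     return lists
-- ===== SOURCE B (Python) =====
-- N = 11
--
--
-- def _isqrt(m: int) -> int:
--     """Integer square root by Newton's method (floor of sqrt, m >= 0)."""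
--     if m < 2:
--         return m
--     x = m
--     y = (m + 1) // 2
--     while y < x:
--         x = y
--         y = (x + m // x) // 2
--     return x
--
--
-- def _zero_free(m: int) -> bool:
--     """True iff the decimal representation of m (> 0) has no digit 0."""
--     while m > 0:
--         if m % 10 == 0:
--             return False
--         m //= 10
--     return True
--
--
-- def compute_square_lists(n: int) -> list[list[int]]:
--     """Generate lists of square numbers with n or fewer digits, excluding
--     numbers containing zero."""
--     lists = [[] for _ in range(N + 1)]
--     for length in range(1, n + 1):
--         lo = _isqrt(10 ** (length - 1) - 1) + 1
--         hi = _isqrt(10 ** length - 1)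
--         lists[length] = [i * i for i in range(lo, hi + 1) if _zero_free(i * i)]
--     return lists
-- ===== Notes on version B (the rewrite author's own statement) =====
-- stated objective: alternative
-- what changed: A builds every square incrementally by adding successive odd numbers in one flat scan, tests zero-freeness with str and buckets by len(str(num)); B instead computes, for each digit length, the exact square-root range with a Newton-iteration integer square root, fills that bucket directly by a list comprehension of i*i over the range, and tests zero-freeness arithmetically by divmod-10 recursion with no string conversion at all.
-- outside the precondition, e.g. on compute_square_lists(12): A raises IndexError, B raises IndexError
import Mathlib
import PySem

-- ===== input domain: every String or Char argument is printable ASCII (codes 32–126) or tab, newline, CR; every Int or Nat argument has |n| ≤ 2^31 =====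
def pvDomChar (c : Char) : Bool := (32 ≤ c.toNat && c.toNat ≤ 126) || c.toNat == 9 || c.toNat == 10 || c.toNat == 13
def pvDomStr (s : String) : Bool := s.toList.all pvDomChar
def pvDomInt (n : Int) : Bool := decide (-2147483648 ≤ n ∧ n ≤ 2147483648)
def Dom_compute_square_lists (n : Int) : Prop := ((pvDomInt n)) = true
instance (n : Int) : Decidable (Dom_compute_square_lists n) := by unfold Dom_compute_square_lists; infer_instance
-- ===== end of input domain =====

-- B replaces A's single flat odd-increment scan (string digit test, bucket by len(str)) with
-- per-digit-length buckets filled directly over a Newton-isqrt-bounded root range, with an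
-- arithmetic divmod-10 zero-freeness test; objective: alternative algorithmic decomposition.


-- ===== PORT A =====
-- A's while loop; state (lists, odd, num).  Fuel `bound.toNat` is always sufficient: num starts
-- at 1 and grows by odd + 2 ≥ 3 each iteration (odd starts at 1 and only grows), so the loop
-- runs fewer than bound times.  '"0" not in str(num)' and 'len(str(num))' are ported through
-- PySem.Int.toChars (= (str num).toList, by PySem.Int.toList_toStr).  'lists[L].append(num)' is
-- List.set at L; under Pre_ (n ≤ 11) every reached L = len(str(num)) ≤ 11 is in range
-- (for n ≥ 12 Python raises IndexError there, which Pre_ excludes).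
def cslLoopA (bound : Int) : Nat → List (List Int) → Int → Int → List (List Int)
  | 0, lists, _, _ => lists
  | fuel+1, lists, odd, num =>
    if num < bound then
      let lists' :=
        if PySem.Chars.isIn ['0'] (PySem.Int.toChars num) then lists
        else
          let L := (PySem.Int.toChars num).length
          lists.set L ((lists.getD L []) ++ [num])
      cslLoopA bound fuel lists' (odd + 2) (num + (odd + 2))
    else lists

def compute_square_lists (n : Int) : List (List Int) :=
  -- lists = [[] for _ in range(N + 1)] with N = 11
  let lists := List.replicate 12 ([] : List Int)
  -- bound = 10**n; for n ≤ 0 Python's 10**n is a float with 0 < 10**n ≤ 1 ≤ num, so the guard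
  -- 'num < 10**n' is false there exactly as with bound = 1 (num = 1 is the only state reached)
  let bound : Int := if 0 < n then 10 ^ n.toNat else 1
  cslLoopA bound bound.toNat lists 1 1

-- ===== PORT B =====
-- B's _isqrt: Newton iteration; state (x, y).  Fuel `m.toNat` is always sufficient: x strictly
-- decreases while the loop runs and starts at m.
def isqrtLoopB (m : Int) : Nat → Int → Int → Int
  | 0, x, _ => x
  | fuel+1, x, y =>
    if y < x then
      isqrtLoopB m fuel y (PySem.Int.floordiv (y + PySem.Int.floordiv m y) 2)
    else x

def isqrtB (m : Int) : Int :=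
  if m < 2 then m
  else isqrtLoopB m m.toNat m (PySem.Int.floordiv (m + 1) 2)

-- B's _zero_free: divmod-10 loop.  Fuel `m.toNat` suffices: m strictly decreases while positive.
def zeroFreeLoopB : Nat → Int → Bool
  | 0, _ => true
  | fuel+1, m =>
    if 0 < m then
      if PySem.Int.mod m 10 == 0 then false
      else zeroFreeLoopB fuel (PySem.Int.floordiv m 10)
    else true

def zeroFreeB (m : Int) : Bool := zeroFreeLoopB m.toNat m

-- B's main function: for each length, 'lists[length] = [comprehension]' is List.set (for
-- n ≥ 12 Python raises IndexError at length = 12, which Pre_ excludes).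
def compute_square_lists_alt (n : Int) : List (List Int) :=
  (PySem.List.pyRange 1 (n + 1)).foldl
    (fun lists L =>
      let lo := isqrtB (10 ^ (L - 1).toNat - 1) + 1
      let hi := isqrtB (10 ^ L.toNat - 1)
      lists.set L.toNat
        (((PySem.List.pyRange lo (hi + 1)).filter (fun i => zeroFreeB (i * i))).map
          (fun i => i * i)))
    (List.replicate 12 ([] : List Int))

-- ===== PRECONDITION & SPEC =====
-- Pre_ excludes exactly n ≥ 12: there both Pythons raise IndexError (A at
-- 'lists[len(str(num))].append(num)' on a 12-digit square, B at 'lists[12] = …').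
def Pre_compute_square_lists (n : Int) : Prop := n ≤ 11
instance (n : Int) : Decidable (Pre_compute_square_lists n) := by unfold Pre_compute_square_lists; infer_instance
def pvWitness_compute_square_lists : Int := 3

def Spec_compute_square_lists (n : Int) (out : List (List Int)) : Prop := out = compute_square_lists_alt n
instance (n : Int) (out : List (List Int)) : Decidable (Spec_compute_square_lists n out) := by unfold Spec_compute_square_lists; infer_instance

-- ===== CLAIM (what is proved, stated in full; the proofs are below) =====
def Claim_equal_compute_square_lists : Prop := ∀ (n : Int), Dom_compute_square_lists n → Pre_compute_square_lists n → Spec_compute_square_lists n (compute_square_lists n)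

-- ===== LEMMAS AND PROOFS =====

-- mq L = the largest i with i*i < 10^L.
def mq (L : Nat) : Nat := Nat.sqrt (10 ^ L - 1)

-- The body of A's loop at num = i*i, as a function of the running lists and i.
def stepA (lists : List (List Int)) (i : Int) : List (List Int) :=
  if PySem.Chars.isIn ['0'] (PySem.Int.toChars (i * i)) then lists
  else
    let L := (PySem.Int.toChars (i * i)).length
    lists.set L ((lists.getD L []) ++ [i * i])

theorem sq_lt_iff (L : Nat) (i : Int) (h1 : 1 ≤ i) : i * i < 10 ^ L ↔ i ≤ (mq L : Int) := by
  have hp : 0 < 10 ^ L := Nat.pow_pos (by norm_num)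
  obtain ⟨m, rfl⟩ : ∃ m : Nat, i = (m : Int) := ⟨i.toNat, (Int.toNat_of_nonneg (by omega)).symm⟩
  have : m * m < 10 ^ L ↔ m ≤ mq L := by
    unfold mq
    rw [Nat.le_sqrt]
    omega
  exact_mod_cast this

theorem mq_mono (L : Nat) : mq L ≤ mq (L + 1) := by
  unfold mq
  exact Nat.sqrt_le_sqrt (by have := Nat.pow_le_pow_right (by norm_num : 1 ≤ 10) (Nat.le_succ L); omega)

theorem pyRange_nil {a b : Int} (h : b ≤ a) : PySem.List.pyRange a b = [] := by
  simp [PySem.List.pyRange]; omega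

-- A's loop from the state reached just before index i (num = i*i, odd = 2i-1) is a fold of
-- stepA over the remaining indices i, i+1, …, mq L.
theorem loopA_eq (L : Nat) : ∀ (fuel : Nat) (i : Int) (lists : List (List Int)), 1 ≤ i →
    ((mq L : Int) + 1 - i).toNat ≤ fuel →
    cslLoopA (10 ^ L) fuel lists (2 * i - 1) (i * i) =
      (PySem.List.pyRange i ((mq L : Int) + 1)).foldl stepA lists := by
  intro fuel
  induction fuel with
  | zero =>
    intro i lists h1 hf
    rw [pyRange_nil (by omega), cslLoopA]
    rfl
  | succ fuel ih =>
    intro i lists h1 hf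
    rw [cslLoopA]
    by_cases hlt : i * i < 10 ^ L
    · have hile : i ≤ (mq L : Int) := (sq_lt_iff L i h1).mp hlt
      rw [if_pos (by exact_mod_cast hlt)]
      rw [PySem.List.pyRange_one_cons (by omega), List.foldl_cons]
      have e1 : (2 * i - 1) + 2 = 2 * (i + 1) - 1 := by ring
      have e2 : i * i + (2 * (i + 1) - 1) = (i + 1) * (i + 1) := by ring
      rw [e1, e2]
      have := ih (i + 1) (stepA lists i) (by omega) (by omega)
      rw [← this]
      rfl
    · rw [if_neg (by exact_mod_cast hlt)]
      have : (mq L : Int) + 1 ≤ i := by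
        by_contra hc
        exact hlt ((sq_lt_iff L i h1).mpr (by omega))
      rw [pyRange_nil this]
      rfl

-- ---------- Newton isqrt correctness ----------

-- One Newton step never falls below the integer square root.
theorem newton_ge_sqrt (m x : Nat) (hx : 1 ≤ x) : Nat.sqrt m ≤ (x + m / x) / 2 := by
  set s := Nat.sqrt m with hs
  have hsq : s * s ≤ m := Nat.sqrt_le m
  have key : 2 * s ≤ x + m / x := by
    by_cases hxs : 2 * s ≤ x
    · exact le_trans hxs (Nat.le_add_right _ _)
    · have h1 : (2 * s - x) * x ≤ m := by
        have hx2 : x ≤ 2 * s := by omega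
        have : (2 * s - x) * x ≤ s * s := by
          zify [hx2]
          nlinarith [sq_nonneg ((s : Int) - x)]
        omega
      have h2 : 2 * s - x ≤ m / x := (Nat.le_div_iff_mul_le (by omega)).mpr h1
      calc 2 * s ≤ x + (2 * s - x) := by omega
        _ ≤ x + m / x := Nat.add_le_add_left h2 x
  rw [Nat.le_div_iff_mul_le (by norm_num : 0 < 2)]
  omega

theorem isqrtLoopB_eq (m : Nat) (hm : 2 ≤ m) : ∀ (fuel x : Nat),
    Nat.sqrt m ≤ x → x - Nat.sqrt m ≤ fuel →
    isqrtLoopB (m : Int) fuel (x : Int) (((x + m / x) / 2 : Nat) : Int) = (Nat.sqrt m : Int) := by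
  have hs1 : 1 ≤ Nat.sqrt m := by rw [Nat.le_sqrt]; omega
  intro fuel
  induction fuel with
  | zero =>
    intro x hsx hf
    have : x = Nat.sqrt m := by omega
    rw [this, isqrtLoopB]
  | succ fuel ih =>
    intro x hsx hf
    have hx1 : 1 ≤ x := le_trans hs1 hsx
    set y := (x + m / x) / 2 with hy
    rw [isqrtLoopB]
    by_cases hlt : y < x
    · rw [if_pos (by exact_mod_cast hlt)]
      have hsy : Nat.sqrt m ≤ y := newton_ge_sqrt m x hx1
      have hfd : PySem.Int.floordiv (m : Int) (y : Int) = ((m / y : Nat) : Int) :=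
        PySem.Int.floordiv_natCast m y
      have hsum : ((y : Int) + ((m / y : Nat) : Int)) = (((y + m / y : Nat) : Int)) := by
        push_cast; ring
      have hfd2 : PySem.Int.floordiv (((y + m / y : Nat) : Int)) 2 =
          (((y + m / y) / 2 : Nat) : Int) := by
        exact_mod_cast PySem.Int.floordiv_natCast (y + m / y) 2
      rw [hfd, hsum, hfd2]
      exact ih y hsy (by omega)
    · rw [if_neg (by exact_mod_cast hlt)]
      -- exit: x ≤ y forces x*x ≤ m, hence x = sqrt m
      have hxy : x ≤ y := by omega
      have h2x : x * 2 ≤ x + m / x := (Nat.le_div_iff_mul_le (by norm_num)).mp hxy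
      have hxm : x ≤ m / x := by omega
      have hxx : x * x ≤ m := by
        have := (Nat.le_div_iff_mul_le (by omega : 0 < x)).mp hxm
        omega
      have : x ≤ Nat.sqrt m := by rw [Nat.le_sqrt]; omega
      have : x = Nat.sqrt m := by omega
      exact_mod_cast this

theorem isqrtB_natCast (m : Nat) : isqrtB (m : Int) = (Nat.sqrt m : Int) := by
  unfold isqrtB
  by_cases hm : (m : Int) < 2
  · rw [if_pos hm]
    have hm' : m < 2 := by exact_mod_cast hm
    interval_cases m <;> decide
  · rw [if_neg hm]
    have hm2 : 2 ≤ m := by exact_mod_cast not_lt.mp hm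
    have hmm : m / m = 1 := Nat.div_self (by omega)
    have h1 : ((m : Int) + 1) = (((m + m / m : Nat) : Int)) := by rw [hmm]; push_cast; ring
    have h2 : PySem.Int.floordiv (((m + m / m : Nat) : Int)) 2 =
        (((m + m / m) / 2 : Nat) : Int) := by
      exact_mod_cast PySem.Int.floordiv_natCast (m + m / m) 2
    rw [h1, h2, Int.toNat_natCast]
    exact isqrtLoopB_eq m hm2 m m (Nat.sqrt_le_self m) (by omega)

theorem isqrtB_pow_sub_one (L : Nat) : isqrtB ((10 : Int) ^ L - 1) = (mq L : Int) := by
  have h : ((10 : Int) ^ L - 1) = (((10 ^ L - 1 : Nat) : Int)) := by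
    have : (1 : Nat) ≤ 10 ^ L := Nat.one_le_pow _ _ (by norm_num)
    push_cast [this]; ring
  rw [h, isqrtB_natCast]
  rfl

-- ---------- zero-freeness: divmod loop vs decimal string ----------

def natHasZero : Nat → Bool
  | 0 => false
  | n+1 => ((n+1) % 10 == 0) || natHasZero ((n+1) / 10)
  decreasing_by exact Nat.div_lt_self (Nat.succ_pos n) (by norm_num)

theorem natHasZero_pos (n : Nat) (h : 0 < n) :
    natHasZero n = ((n % 10 == 0) || natHasZero (n / 10)) := by
  cases n with
  | zero => omega
  | succ k => rw [natHasZero]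

theorem zeroFreeLoopB_eq : ∀ (fuel n : Nat), n ≤ fuel →
    zeroFreeLoopB fuel (n : Int) = !natHasZero n := by
  intro fuel
  induction fuel with
  | zero =>
    intro n hn
    have : n = 0 := by omega
    subst this
    rw [zeroFreeLoopB]
    simp [natHasZero]
  | succ fuel ih =>
    intro n hn
    rw [zeroFreeLoopB]
    by_cases h0 : 0 < n
    · rw [if_pos (by exact_mod_cast h0)]
      have hmod : PySem.Int.mod (n : Int) 10 = ((n % 10 : Nat) : Int) := by
        exact_mod_cast PySem.Int.mod_natCast n 10
      have hdiv : PySem.Int.floordiv (n : Int) 10 = ((n / 10 : Nat) : Int) := by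
        exact_mod_cast PySem.Int.floordiv_natCast n 10
      rw [hmod, hdiv, natHasZero_pos n h0]
      by_cases hz : n % 10 = 0
      · simp [hz]
      · have hb : (((n % 10 : Nat) : Int) == 0) = false := by
          simp only [beq_eq_false_iff_ne, ne_eq]
          exact_mod_cast hz
        rw [hb, if_neg (by simp)]
        have : n / 10 ≤ fuel := by
          have := Nat.div_lt_self h0 (by norm_num : 1 < 10)
          omega
        rw [ih (n / 10) this]
        simp [hz]
    · rw [if_neg (by omega), (by omega : n = 0)]
      simp [natHasZero]

theorem zeroFreeB_natCast (n : Nat) : zeroFreeB (n : Int) = !natHasZero n := by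
  unfold zeroFreeB
  rw [Int.toNat_natCast]
  exact zeroFreeLoopB_eq n n le_rfl

-- '0' occurs among the decimal digit characters of n ≥ 1 iff natHasZero n.
theorem mem_toDigitsCore_iff : ∀ (fuel n : Nat) (acc : List Char), 1 ≤ n → n < fuel →
    ('0' ∈ Nat.toDigitsCore 10 fuel n acc ↔ natHasZero n = true ∨ '0' ∈ acc) := by
  intro fuel
  induction fuel with
  | zero => intro n acc h1 h2; omega
  | succ fuel ih =>
    intro n acc h1 h2
    rw [Nat.toDigitsCore]
    have hchar : (Nat.digitChar (n % 10) = '0') ↔ n % 10 = 0 := by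
      have : n % 10 < 10 := Nat.mod_lt _ (by norm_num)
      interval_cases h : n % 10 <;> simp [Nat.digitChar]
    rw [natHasZero_pos n (by omega)]
    by_cases hdiv : n / 10 = 0
    · rw [if_pos hdiv, hdiv]
      simp only [List.mem_cons, natHasZero, Bool.or_false]
      constructor
      · rintro (h | h)
        · exact Or.inl (by simp [hchar.mp h.symm])
        · exact Or.inr h
      · rintro (h | h)
        · exact Or.inl (hchar.mpr (by simpa using h)).symm
        · exact Or.inr h
    · rw [if_neg hdiv]
      have hlt : n / 10 < fuel := by
        have := Nat.div_lt_self (by omega : 0 < n) (by norm_num : 1 < 10)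
        omega
      rw [ih (n / 10) _ (by omega) hlt]
      simp only [List.mem_cons]
      constructor
      · rintro (h | h | h)
        · exact Or.inl (by simp [h])
        · exact Or.inl (by simp [hchar.mp h.symm])
        · exact Or.inr h
      · rintro (h | h)
        · rcases Bool.or_eq_true_iff.mp h with h' | h'
          · exact Or.inr (Or.inl (hchar.mpr (by simpa using h')).symm)
          · exact Or.inl h'
        · exact Or.inr (Or.inr h)

theorem singleton_infix_iff {c : Char} {l : List Char} : [c] <:+: l ↔ c ∈ l := by
  constructor
  · intro h
    exact h.subset (List.mem_singleton_self c)
  · intro h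
    obtain ⟨s, t, rfl⟩ := List.append_of_mem h
    exact ⟨s, t, by simp⟩

theorem isIn_toChars_sq (i : Int) (h1 : 1 ≤ i) :
    PySem.Chars.isIn ['0'] (PySem.Int.toChars (i * i)) = natHasZero (i * i).toNat := by
  obtain ⟨m, rfl⟩ : ∃ m : Nat, i = (m : Int) := ⟨i.toNat, (Int.toNat_of_nonneg (by omega)).symm⟩
  have hm1 : 1 ≤ m := by exact_mod_cast h1
  have hcast : ((m : Int) * m) = ((m * m : Nat) : Int) := by push_cast; ring
  have hchars : PySem.Int.toChars ((m : Int) * m) = Nat.toDigits 10 (m * m) := by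
    rw [hcast]
    simp only [PySem.Int.toChars, Int.toNat_natCast]
    rw [if_neg (by exact_mod_cast Int.not_lt.mpr (Int.natCast_nonneg _))]
  rw [hchars, hcast, Int.toNat_natCast]
  by_cases hz : natHasZero (m * m) = true
  · rw [hz]
    rw [PySem.Chars.isIn_iff_infix, singleton_infix_iff, Nat.toDigits]
    exact (mem_toDigitsCore_iff (m * m + 1) (m * m) [] (Nat.one_le_iff_ne_zero.mpr
      (by positivity)) (by omega)).mpr (Or.inl hz)
  · rw [Bool.not_eq_true] at hz
    rw [hz, ← Bool.not_eq_true, PySem.Chars.isIn_iff_infix, singleton_infix_iff, Nat.toDigits]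
    intro hmem
    rcases (mem_toDigitsCore_iff (m * m + 1) (m * m) [] (Nat.one_le_iff_ne_zero.mpr
      (by positivity)) (by omega)).mp hmem with h | h
    · rw [hz] at h; exact Bool.false_ne_true h
    · simp at h

-- ---------- digit count of squares in the (L+1)-st root block ----------

theorem toDigitsCore_len_ge (b : Nat) : ∀ (f n e : Nat), 2 ≤ b → n < f → b ^ e ≤ n →
    e + 1 ≤ (Nat.toDigitsCore b f n []).length := by
  intro f
  induction f with
  | zero => intro n e _ h; omega
  | succ f ih =>
    intro n e hb hf he
    simp only [Nat.toDigitsCore]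
    cases e with
    | zero =>
      split
      · simp
      · rw [Nat.toDigitsCore_lens_eq]; omega
    | succ e =>
      have hdiv : b ^ e ≤ n / b := (Nat.le_div_iff_mul_le (by omega)).mpr (by
        calc b ^ e * b = b ^ (e + 1) := by ring
        _ ≤ n := he)
      have hne : n / b ≠ 0 := by
        have : 0 < b ^ e := Nat.pow_pos (by omega)
        omega
      rw [if_neg hne, Nat.toDigitsCore_lens_eq]
      have hlt : n / b < f := by
        have hn : 0 < n := lt_of_lt_of_le (Nat.pow_pos (by omega : 0 < b)) he
        have : n / b < n := Nat.div_lt_self hn (by omega)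
        omega
      have := ih (n / b) e hb hlt hdiv
      omega

theorem toDigits_len_exact (n L : Nat) (h1 : 10 ^ L ≤ n) (h2 : n < 10 ^ (L + 1)) :
    (Nat.toDigits 10 n).length = L + 1 := by
  refine le_antisymm (Nat.toDigits_length 10 n (L + 1) (by omega) h2) ?_
  exact toDigitsCore_len_ge 10 (n + 1) n L (by norm_num) (by omega) h1

-- On the (L+1)-st block of indices (mq L < i ≤ mq (L+1)) the square has exactly L+1 digits.
theorem toChars_sq_len (L : Nat) (i : Int) (hlo : (mq L : Int) < i) (hhi : i ≤ (mq (L + 1) : Int)) :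
    (PySem.Int.toChars (i * i)).length = L + 1 := by
  obtain ⟨m, rfl⟩ : ∃ m : Nat, i = (m : Int) := ⟨i.toNat, (Int.toNat_of_nonneg (by omega)).symm⟩
  have hmlo : mq L < m := by exact_mod_cast hlo
  have hmhi : m ≤ mq (L + 1) := by exact_mod_cast hhi
  have hlow : 10 ^ L ≤ m * m := by
    have h1 : 10 ^ L - 1 < (mq L + 1) ^ 2 := Nat.lt_succ_sqrt' (10 ^ L - 1)
    have h2 : (mq L + 1) ^ 2 ≤ m * m := by
      have : mq L + 1 ≤ m := hmlo
      calc (mq L + 1) ^ 2 = (mq L + 1) * (mq L + 1) := by ring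
        _ ≤ m * m := Nat.mul_le_mul this this
    have hp : 0 < 10 ^ L := Nat.pow_pos (by norm_num)
    omega
  have hhigh : m * m < 10 ^ (L + 1) := by
    have h1 : (mq (L + 1)) ^ 2 ≤ 10 ^ (L + 1) - 1 := Nat.sqrt_le' (10 ^ (L + 1) - 1)
    have h2 : m * m ≤ mq (L + 1) * mq (L + 1) := Nat.mul_le_mul hmhi hmhi
    have hp : 0 < 10 ^ (L + 1) := Nat.pow_pos (by norm_num)
    have : mq (L + 1) * mq (L + 1) = mq (L + 1) ^ 2 := by ring
    omega
  have hchars : PySem.Int.toChars ((m : Int) * m) = Nat.toDigits 10 (m * m) := by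
    have : ((m : Int) * m) = ((m * m : Nat) : Int) := by push_cast; ring
    rw [this]
    simp only [PySem.Int.toChars, Int.toNat_natCast]
    rw [if_neg (by exact_mod_cast Int.not_lt.mpr (Int.natCast_nonneg _))]
  rw [hchars]
  exact toDigits_len_exact (m * m) L hlow hhigh

-- ---------- a block of A-steps fills exactly one bucket ----------

theorem getD_set_self (l : List (List Int)) (i : Nat) (v : List Int) (h : i < l.length) :
    (l.set i v).getD i [] = v := by
  rw [List.getD_eq_getElem _ [] (by simpa using h)]
  simp

theorem foldl_stepA_block (L : Nat) : ∀ (R : List Int) (lists : List (List Int)),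
    L < lists.length → (∀ i ∈ R, (PySem.Int.toChars (i * i)).length = L) →
    R.foldl stepA lists =
      lists.set L (lists.getD L [] ++
        (R.filter (fun i => !PySem.Chars.isIn ['0'] (PySem.Int.toChars (i * i)))).map
          (fun i => i * i)) := by
  intro R
  induction R with
  | nil =>
    intro lists hL _
    simp only [List.foldl_nil, List.filter_nil, List.map_nil, List.append_nil]
    rw [List.getD_eq_getElem lists [] hL]
    exact (List.set_getElem_self hL).symm
  | cons i R ih =>
    intro lists hL hlen
    rw [List.foldl_cons, List.filter_cons]
    have hlenI : (PySem.Int.toChars (i * i)).length = L := hlen i (List.mem_cons_self ..)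
    by_cases hz : PySem.Chars.isIn ['0'] (PySem.Int.toChars (i * i)) = true
    · rw [stepA, if_pos hz]
      simp only [hz, Bool.not_true, if_neg (Bool.false_ne_true)]
      exact ih lists hL (fun j hj => hlen j (List.mem_cons_of_mem _ hj))
    · rw [Bool.not_eq_true] at hz
      rw [stepA, if_neg (by simp [hz]), hlenI]
      simp only [hz, Bool.not_false, ite_true]
      rw [ih (lists.set L (lists.getD L [] ++ [i * i])) (by simpa using hL)
        (fun j hj => hlen j (List.mem_cons_of_mem _ hj))]
      rw [getD_set_self _ _ _ hL, List.set_set]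
      simp
  
-- ---------- B's outer fold equals A's flat fold ----------

-- The body of B's outer loop (one length).
def stepB (lists : List (List Int)) (L : Int) : List (List Int) :=
  lists.set L.toNat
    (((PySem.List.pyRange (isqrtB (10 ^ (L - 1).toNat - 1) + 1)
        (isqrtB (10 ^ L.toNat - 1) + 1)).filter (fun i => zeroFreeB (i * i))).map
      (fun i => i * i))

theorem main_pos : ∀ (k : Nat), k ≤ 11 →
    (PySem.List.pyRange 1 ((mq k : Int) + 1)).foldl stepA (List.replicate 12 ([] : List Int)) =
      (PySem.List.pyRange 1 ((k : Int) + 1)).foldl stepB (List.replicate 12 ([] : List Int)) ∧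
    ((PySem.List.pyRange 1 ((k : Int) + 1)).foldl stepB
        (List.replicate 12 ([] : List Int))).length = 12 ∧
    (∀ j, k < j →
      ((PySem.List.pyRange 1 ((k : Int) + 1)).foldl stepB
        (List.replicate 12 ([] : List Int))).getD j [] = []) := by
  intro k
  induction k with
  | zero =>
    intro _
    have h0 : mq 0 = 0 := by simp [mq]
    have hnil : PySem.List.pyRange 1 (((0 : Nat) : Int) + 1) = [] := pyRange_nil (by norm_num)
    rw [h0, hnil]
    refine ⟨rfl, by simp, ?_⟩
    intro j _
    simp only [List.foldl_nil]
    rw [List.getD_eq_getElem?_getD, List.getElem?_replicate]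
    split <;> rfl
  | succ k ih =>
    intro hk
    obtain ⟨heq, hlen, hempty⟩ := ih (by omega)
    have hmono := mq_mono k
    have hc : ((k + 1 : Nat) : Int) + 1 = ((k : Int) + 1) + 1 := by push_cast; ring
    have hstep : ∀ lists, stepB lists ((k : Int) + 1) =
        lists.set (k + 1)
          (((PySem.List.pyRange ((mq k : Int) + 1) ((mq (k + 1) : Int) + 1)).filter
            (fun i => zeroFreeB (i * i))).map (fun i => i * i)) := by
      intro lists
      unfold stepB
      have e1 : (((k : Int) + 1) - 1).toNat = k := by omega
      have e2 : ((k : Int) + 1).toNat = k + 1 := by omega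
      rw [e1, e2, isqrtB_pow_sub_one, isqrtB_pow_sub_one]
    -- B side: peel the last length
    have hBside : (PySem.List.pyRange 1 (((k + 1 : Nat) : Int) + 1)).foldl stepB
        (List.replicate 12 ([] : List Int)) =
        stepB ((PySem.List.pyRange 1 ((k : Int) + 1)).foldl stepB
          (List.replicate 12 ([] : List Int))) ((k : Int) + 1) := by
      rw [hc, PySem.List.pyRange_one_succ_right (by omega), List.foldl_append,
        List.foldl_cons, List.foldl_nil]
    -- A side: split the root range at mq k + 1
    set Fk := (PySem.List.pyRange 1 ((k : Int) + 1)).foldl stepB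
      (List.replicate 12 ([] : List Int)) with hFk
    have hblockR : ∀ i ∈ PySem.List.pyRange ((mq k : Int) + 1) ((mq (k + 1) : Int) + 1),
        (PySem.Int.toChars (i * i)).length = k + 1 := by
      intro i hi
      rw [PySem.List.mem_pyRange_one] at hi
      exact toChars_sq_len k i (by omega) (by omega)
    have hAside : (PySem.List.pyRange 1 ((mq (k + 1) : Int) + 1)).foldl stepA
        (List.replicate 12 ([] : List Int)) =
        Fk.set (k + 1)
          (Fk.getD (k + 1) [] ++
            ((PySem.List.pyRange ((mq k : Int) + 1) ((mq (k + 1) : Int) + 1)).filter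
              (fun i => !PySem.Chars.isIn ['0'] (PySem.Int.toChars (i * i)))).map
              (fun i => i * i)) := by
      rw [PySem.List.pyRange_one_append 1 ((mq k : Int) + 1) ((mq (k + 1) : Int) + 1)
        (by omega) (by exact_mod_cast by omega), List.foldl_append, heq]
      exact foldl_stepA_block (k + 1) _ Fk (by omega) hblockR
    have hfilter : (PySem.List.pyRange ((mq k : Int) + 1) ((mq (k + 1) : Int) + 1)).filter
        (fun i => !PySem.Chars.isIn ['0'] (PySem.Int.toChars (i * i))) =
        (PySem.List.pyRange ((mq k : Int) + 1) ((mq (k + 1) : Int) + 1)).filter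
        (fun i => zeroFreeB (i * i)) := by
      apply List.filter_congr
      intro i hi
      rw [PySem.List.mem_pyRange_one] at hi
      have h1 : 1 ≤ i := by omega
      obtain ⟨m, rfl⟩ : ∃ m : Nat, i = (m : Int) := ⟨i.toNat, (Int.toNat_of_nonneg (by omega)).symm⟩
      have hcast : ((m : Int) * m) = ((m * m : Nat) : Int) := by push_cast; ring
      rw [isIn_toChars_sq _ h1, hcast, zeroFreeB_natCast, Int.toNat_natCast]
    refine ⟨?_, ?_, ?_⟩
    · rw [hAside, hBside, hstep, hfilter, hempty (k + 1) (by omega), List.nil_append]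
    · rw [hBside, hstep]
      simpa using hlen
    · intro j hj
      rw [hBside, hstep]
      rw [List.getD_eq_getElem?_getD, List.getElem?_set_ne (by omega)]
      rw [← List.getD_eq_getElem?_getD]
      exact hempty j (by omega)

-- The ports agree for every n ≤ 11.
theorem csl_eq (n : Int) (hpre : n ≤ 11) : compute_square_lists n = compute_square_lists_alt n := by
  unfold compute_square_lists compute_square_lists_alt
  by_cases hn : 0 < n
  · simp only [if_pos hn]
    obtain ⟨k, rfl⟩ : ∃ k : Nat, n = (k : Nat) := ⟨n.toNat, (Int.toNat_of_nonneg (by omega)).symm⟩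
    have hk11 : k ≤ 11 := by exact_mod_cast hpre
    have htn : ((k : Int)).toNat = k := by omega
    rw [htn]
    have hcast : ((10 : Int) ^ k).toNat = 10 ^ k := by
      have : ((10 : Int) ^ k) = ((10 ^ k : Nat) : Int) := by push_cast; ring
      rw [this, Int.toNat_natCast]
    rw [hcast]
    have hfuel : ((mq k : Int) + 1 - 1).toNat ≤ 10 ^ k := by
      have := Nat.sqrt_le_self (10 ^ k - 1)
      have h10 : 0 < 10 ^ k := Nat.pow_pos (by norm_num)
      simp only [mq] at *
      omega
    have hA := loopA_eq k (10 ^ k) 1 (List.replicate 12 ([] : List Int)) (le_refl 1) hfuel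
    norm_num at hA
    rw [hA]
    exact (main_pos k hk11).1
  · simp only [if_neg hn]
    rw [pyRange_nil (by omega : (n + 1 : Int) ≤ 1)]
    show cslLoopA 1 (1 : Int).toNat _ 1 1 = _
    rw [Int.toNat_one, cslLoopA, if_neg (by omega)]
    rfl

-- ===== VERDICT (by name: the statement is the Claim_ definition above) =====
theorem compute_square_lists_spec : Claim_equal_compute_square_lists := by
  intro n _hdom hpre
  unfold Spec_compute_square_lists
  exact csl_eq n hpre
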